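-- pv_equiv track=rewrite | github.com/fp-computer-programming/cycle-10-labs-p22anishiyama | cycle-10-labs-2.py | divisibility
-- ===== SOURCE A (Python) =====
-- def divisibility(lst):
--     values = []
--     for x in lst:
--         if(x > 500):
--             break
--         elif x % 5 == 0 and x <= 150:
--             values.append(x)
--     return values
-- ===== SOURCE B (Python) =====
-- from functools import reduce
--
-- def divisibility(lst):
--     # Fold over the whole list with a (reversed-accumulator, stopped) state:
--     # once an element > 500 is seen the state freezes; qualifying multiples
--     # of 5 are prepended and the accumulator is reversed at the end.
--     def step(state, x):
--         rev, stopped = state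
--         if stopped or x > 500:
--             return (rev, True)
--         if x % 5 == 0 and x <= 150:
--             return ([x] + rev, False)
--         return (rev, stopped)
--     rev, _ = reduce(step, lst, ([], False))
--     return rev[::-1]
-- ===== Notes on version B (the rewrite author's own statement) =====
-- stated objective: alternative
-- what changed: Replaces the loop with break and append-accumulator by a total fold over the whole list carrying a (reversed list, stopped-flag) state, with a final reversal; no early exit, output built back-to-front.
import Mathlib
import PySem

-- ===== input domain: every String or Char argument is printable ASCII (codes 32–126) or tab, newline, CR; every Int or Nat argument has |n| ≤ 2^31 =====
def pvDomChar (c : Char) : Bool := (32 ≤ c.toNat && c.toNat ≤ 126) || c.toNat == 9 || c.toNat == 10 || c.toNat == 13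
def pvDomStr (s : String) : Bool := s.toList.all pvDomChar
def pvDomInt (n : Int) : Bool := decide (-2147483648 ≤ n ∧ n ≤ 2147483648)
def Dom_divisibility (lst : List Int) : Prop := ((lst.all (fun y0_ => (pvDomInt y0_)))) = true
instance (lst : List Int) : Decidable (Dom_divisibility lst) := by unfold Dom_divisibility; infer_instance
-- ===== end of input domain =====

-- B replaces A's loop-with-break/append by a total fold with a stopped flag that
-- builds the result back-to-front and reverses it; same return value on all inputs.

-- ===== PORT A =====
def divisibilityLoop : List Int → List Int → List Int
  | acc, [] => acc
  | acc, x :: xs =>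
    if x > 500 then acc
    else if PySem.Int.mod x 5 == 0 && x ≤ 150 then divisibilityLoop (acc ++ [x]) xs
    else divisibilityLoop acc xs

def divisibility (lst : List Int) : List Int := divisibilityLoop [] lst

-- ===== PORT B =====
def divisibilityStep (state : List Int × Bool) (x : Int) : List Int × Bool :=
  if state.2 || x > 500 then (state.1, true)
  else if PySem.Int.mod x 5 == 0 && x ≤ 150 then (x :: state.1, false)
  else state

def divisibility_alt (lst : List Int) : List Int :=
  (lst.foldl divisibilityStep ([], false)).1.reverse

-- ===== PRECONDITION & SPEC =====
def Spec_divisibility (lst : List Int) (out : List Int) : Prop := out = divisibility_alt lst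
instance (lst : List Int) (out : List Int) : Decidable (Spec_divisibility lst out) := by unfold Spec_divisibility; infer_instance

-- ===== CLAIM (what is proved, stated in full; the proofs are below) =====
def Claim_equal_divisibility : Prop := ∀ (lst : List Int), Dom_divisibility lst → Spec_divisibility lst (divisibility lst)

-- ===== LEMMAS AND PROOFS =====
-- common characterization of the result
def divSpec : List Int → List Int
  | [] => []
  | x :: xs =>
    if x > 500 then []
    else if PySem.Int.mod x 5 == 0 && x ≤ 150 then x :: divSpec xs
    else divSpec xs

theorem divisibilityLoop_eq (lst acc : List Int) :
    divisibilityLoop acc lst = acc ++ divSpec lst := by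
  induction lst generalizing acc with
  | nil => simp [divisibilityLoop, divSpec]
  | cons x xs ih =>
    by_cases h : x > 500
    · simp [divisibilityLoop, divSpec, h]
    · by_cases h2 : (5 ∣ x ∧ x ≤ 150)
      · simp [divisibilityLoop, divSpec, h, h2, ih]
      · simp [divisibilityLoop, divSpec, h, h2, ih]

theorem foldl_stopped (lst rev : List Int) :
    lst.foldl divisibilityStep (rev, true) = (rev, true) := by
  induction lst with
  | nil => rfl
  | cons x xs ih => simp [List.foldl, divisibilityStep, ih]

theorem foldl_running (lst rev : List Int) :
    (lst.foldl divisibilityStep (rev, false)).1.reverse = rev.reverse ++ divSpec lst := by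
  induction lst generalizing rev with
  | nil => simp [divSpec]
  | cons x xs ih =>
    by_cases h : x > 500
    · simp [List.foldl, divisibilityStep, h, foldl_stopped, divSpec]
    · by_cases h2 : (5 ∣ x ∧ x ≤ 150)
      · simp [List.foldl, divisibilityStep, h, h2, ih, divSpec]
      · simp [List.foldl, divisibilityStep, h, h2, ih, divSpec]

-- ===== VERDICT (by name: the statement is the Claim_ definition above) =====
theorem divisibility_spec : Claim_equal_divisibility := by
  intro lst _
  unfold Spec_divisibility divisibility divisibility_alt
  rw [divisibilityLoop_eq, foldl_running]
  simp
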